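-- pv_equiv track=rewrite | github.com/kevinrunescape1997/svg-optimizer-gui | pixel_svg_optimizer.py | _minify_path_d
-- ===== SOURCE A (Python) =====
-- def _minify_path_d(d: str) -> str:
--     if not d:
--         return d
--     d_min = " ".join(d.split())
--     for cmd in ("H", "V", "M", "L", "h", "v", "m", "l"):
--         d_min = d_min.replace(f"{cmd} ", f"{cmd}")
--     for cmd in ("M", "H", "V", "L", "Z", "m", "h", "v", "l", "z"):
--         d_min = d_min.replace(f" {cmd}", cmd)
--     d_min = d_min.replace(" Z", "Z").replace("Z ", "Z")
--     d_min = d_min.replace(" z", "z").replace("z ", "z")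
--     return d_min
-- ===== SOURCE B (Python) =====
-- def _minify_path_d(d: str) -> str:
--     if not d:
--         return d
--     cmds = set("MLHVZmlhvz")
--     s = " ".join(d.split())
--     res = []
--     for prev, ch, nxt in zip(" " + s, s, s[1:] + " "):
--         if ch == " " and (prev in cmds or nxt in cmds):
--             continue
--         res.append(ch)
--     return "".join(res)
-- ===== Notes on version B (the rewrite author's own statement) =====
-- stated objective: alternative
-- what changed: Replaced the 18 sequential full-string .replace passes with one single character-level scan that drops a space exactly when a neighbouring character is a path command letter (MLHVZmlhvz).
import Mathlib
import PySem

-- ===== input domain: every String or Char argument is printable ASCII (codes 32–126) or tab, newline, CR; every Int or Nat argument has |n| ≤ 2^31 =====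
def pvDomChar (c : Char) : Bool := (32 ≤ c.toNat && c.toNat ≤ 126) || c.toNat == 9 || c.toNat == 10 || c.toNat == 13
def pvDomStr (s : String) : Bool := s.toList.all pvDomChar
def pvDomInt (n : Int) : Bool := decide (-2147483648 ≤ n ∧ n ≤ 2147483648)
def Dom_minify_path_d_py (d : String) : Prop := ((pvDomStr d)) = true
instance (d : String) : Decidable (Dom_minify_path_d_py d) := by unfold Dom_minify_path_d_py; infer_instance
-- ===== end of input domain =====

-- B replaces A's 18 sequential full-string replace passes by a single character scan that drops a
-- space exactly when a neighbouring character is a path-command letter (alternative decomposition).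

-- ===== PORT A =====
def minify_path_d_py (d : String) : String :=
  if d = "" then d
  else
    let d1 := PySem.Str.join " " (PySem.Str.split₀ d)
    let d2 := ["H", "V", "M", "L", "h", "v", "m", "l"].foldl
      (fun s c => PySem.Str.replace s (c ++ " ") c) d1
    let d3 := ["M", "H", "V", "L", "Z", "m", "h", "v", "l", "z"].foldl
      (fun s c => PySem.Str.replace s (" " ++ c) c) d2
    let d4 := PySem.Str.replace (PySem.Str.replace d3 " Z" "Z") "Z " "Z"
    PySem.Str.replace (PySem.Str.replace d4 " z" "z") "z " "z"

-- ===== PORT B =====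
-- helper: Python's zip over three sequences
def pvZip3 {α β γ : Type} : List α → List β → List γ → List (α × β × γ)
  | a :: as, b :: bs, c :: cs => (a, b, c) :: pvZip3 as bs cs
  | _, _, _ => []

def minify_path_d_py_alt (d : String) : String :=
  if d = "" then d
  else
    let cmds : PySem.Set Char := PySem.Set.ofList "MLHVZmlhvz".toList
    let s := PySem.Str.join " " (PySem.Str.split₀ d)
    let res : List Char :=
      (pvZip3 (" " ++ s).toList s.toList (PySem.Str.slice s (some 1) none ++ " ").toList).foldl
        (fun acc t => if t.2.1 = ' ' ∧ (t.1 ∈ cmds ∨ t.2.2 ∈ cmds) then acc else acc ++ [t.2.1]) []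
    String.ofList res

-- ===== PRECONDITION & SPEC =====
def Spec_minify_path_d_py (d : String) (out : String) : Prop := out = minify_path_d_py_alt d
instance (d : String) (out : String) : Decidable (Spec_minify_path_d_py d out) := by unfold Spec_minify_path_d_py; infer_instance

-- ===== CLAIM (what is proved, stated in full; the proofs are below) =====
def Claim_equal_minify_path_d_py : Prop := ∀ (d : String), Dom_minify_path_d_py d → Spec_minify_path_d_py d (minify_path_d_py d)

-- ===== LEMMAS AND PROOFS =====

-- "isolated spaces": no two adjacent spaces, no trailing space
def pvIso : List Char → Bool
  | [] => true
  | [a] => !(a == ' ')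
  | a :: b :: t => (!(a == ' ') || !(b == ' ')) && pvIso (b :: t)

-- drop the space of every interior window "a ' ' b" with P a b true
def pvScrub (P : Char → Char → Bool) : List Char → List Char
  | [] => []
  | [a] => [a]
  | [a, b] => [a, b]
  | a :: b :: c :: t =>
    if b = ' ' then
      (if P a c then a :: pvScrub P (c :: t) else a :: b :: pvScrub P (c :: t))
    else a :: pvScrub P (b :: c :: t)
  termination_by l => l.length

-- Python str.replace with nonempty needle (o :: rest), fuel-free
def pvRepl (o : Char) (rest new : List Char) : List Char → List Char
  | [] => []
  | c :: t =>
    if (o :: rest).isPrefixOf (c :: t) then new ++ pvRepl o rest new (t.drop rest.length)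
    else c :: pvRepl o rest new t
  termination_by l => l.length
  decreasing_by all_goals (simp only [List.length_drop, List.length_cons]; omega)

-- the commanding letter set, as B's membership test
def pvPt (a b : Char) : Bool :=
  decide (a ∈ PySem.Set.ofList "MLHVZmlhvz".toList ∨ b ∈ PySem.Set.ofList "MLHVZmlhvz".toList)

-- A's replace passes: (letter, true) = "X " → "X", (letter, false) = " X" → "X"
def pvPasses : List (Char × Bool) :=
  [('H', true), ('V', true), ('M', true), ('L', true), ('h', true), ('v', true), ('m', true), ('l', true),
   ('M', false), ('H', false), ('V', false), ('L', false), ('Z', false),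
   ('m', false), ('h', false), ('v', false), ('l', false), ('z', false),
   ('Z', false), ('Z', true), ('z', false), ('z', true)]

theorem pvRepl_cons (o : Char) (rest new : List Char) (c : Char) (t : List Char) :
    pvRepl o rest new (c :: t) =
      if (o :: rest).isPrefixOf (c :: t) then new ++ pvRepl o rest new (t.drop rest.length)
      else c :: pvRepl o rest new t := by
  simp only [pvRepl]

theorem pvRepl_cons_pos (o : Char) (rest new : List Char) (c : Char) (t : List Char)
    (h : (o :: rest).isPrefixOf (c :: t) = true) :
    pvRepl o rest new (c :: t) = new ++ pvRepl o rest new (t.drop rest.length) := by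
  rw [pvRepl_cons, if_pos h]

theorem pvRepl_cons_neg (o : Char) (rest new : List Char) (c : Char) (t : List Char)
    (h : (o :: rest).isPrefixOf (c :: t) = false) :
    pvRepl o rest new (c :: t) = c :: pvRepl o rest new t := by
  rw [pvRepl_cons, if_neg (by simp [h])]

theorem pvPre2_neg_head (o p c : Char) (t : List Char) (h : o ≠ c) :
    ([o, p]).isPrefixOf (c :: t) = false := by
  cases t <;> simp [List.isPrefixOf, h]

theorem pvPre2_neg_snd (o p c b : Char) (t : List Char) (h : p ≠ b) :
    ([o, p]).isPrefixOf (c :: b :: t) = false := by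
  simp [List.isPrefixOf, h]

theorem pvPre2_pos (o p c b : Char) (t : List Char) (h1 : o = c) (h2 : p = b) :
    ([o, p]).isPrefixOf (c :: b :: t) = true := by
  simp [List.isPrefixOf, h1, h2]

theorem pvPre2_nil (o p c : Char) : ([o, p]).isPrefixOf [c] = false := by
  simp [List.isPrefixOf]

theorem pvGo_eq (o : Char) (rest new : List Char) :
    ∀ (fuel : Nat) (l acc : List Char), l.length ≤ fuel →
      PySem.Chars.replace.go (o :: rest) new fuel l acc = acc.reverse ++ pvRepl o rest new l := by
  intro fuel
  induction fuel with
  | zero =>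
    intro l acc h
    cases l with
    | nil => simp [PySem.Chars.replace.go, pvRepl]
    | cons c t => simp at h
  | succ n ih =>
    intro l acc h
    cases l with
    | nil => simp [PySem.Chars.replace.go, pvRepl]
    | cons c t =>
      simp only [PySem.Chars.replace.go]
      by_cases hp : (o :: rest).isPrefixOf (c :: t)
      · rw [if_pos hp, ih _ _ (by simp [List.length_drop] at h ⊢; omega)]
        rw [pvRepl_cons_pos o rest new c t hp]
        simp
      · rw [if_neg hp, ih _ _ (by simp at h ⊢; omega)]
        rw [pvRepl_cons_neg o rest new c t (by simp only [Bool.not_eq_true] at hp; exact hp)]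
        simp

theorem pvReplace_eq (o : Char) (rest new l : List Char) :
    PySem.Chars.replace l (o :: rest) new = pvRepl o rest new l := by
  unfold PySem.Chars.replace
  rw [if_neg (by simp)]
  simpa using pvGo_eq o rest new l.length l [] (le_refl _)

-- pieces of str.split() are nonempty and free of whitespace characters
theorem pvSplitGoGood :
    ∀ (s cur : List Char) (acc : List (List Char)),
      (∀ p ∈ acc, p ≠ [] ∧ ∀ c ∈ p, PySem.Chars.isspace c = false) →
      (∀ c ∈ cur, PySem.Chars.isspace c = false) →
      ∀ p ∈ PySem.Chars.split₀.go s cur acc, p ≠ [] ∧ ∀ c ∈ p, PySem.Chars.isspace c = false := by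
  intro s
  induction s with
  | nil =>
    intro cur acc hacc hcur p hp
    simp only [PySem.Chars.split₀.go] at hp
    by_cases hc : cur.isEmpty
    · rw [if_pos hc] at hp
      exact hacc p (List.mem_reverse.mp hp)
    · rw [if_neg hc] at hp
      rcases List.mem_cons.mp (List.mem_reverse.mp hp) with h | h
      · subst h
        refine ⟨?_, ?_⟩
        · simp only [ne_eq, List.reverse_eq_nil_iff]
          simpa [List.isEmpty_iff] using hc
        · intro x hx
          exact hcur x (List.mem_reverse.mp hx)
      · exact hacc p h
  | cons c rest ih =>
    intro cur acc hacc hcur p hp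
    simp only [PySem.Chars.split₀.go] at hp
    by_cases hs : PySem.Chars.isspace c
    · rw [if_pos hs] at hp
      by_cases hc : cur.isEmpty
      · rw [if_pos hc] at hp
        exact ih [] acc hacc (by simp) p hp
      · rw [if_neg hc] at hp
        refine ih [] _ ?_ (by simp) p hp
        intro q hq
        rcases List.mem_cons.mp hq with rfl | hq
        · refine ⟨?_, ?_⟩
          · simp only [ne_eq, List.reverse_eq_nil_iff]
            simpa [List.isEmpty_iff] using hc
          · intro x hx
            exact hcur x (List.mem_reverse.mp hx)
        · exact hacc q hq
    · rw [if_neg hs] at hp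
      refine ih (c :: cur) acc hacc ?_ p hp
      intro x hx
      rcases List.mem_cons.mp hx with rfl | hx
      · simpa using hs
      · exact hcur x hx

theorem pvSplitGood (l : List Char) :
    ∀ p ∈ PySem.Chars.split₀ l, p ≠ [] ∧ ∀ c ∈ p, c ≠ ' ' := by
  intro p hp
  have h := pvSplitGoGood l [] [] (by simp) (by simp) p (by simpa [PySem.Chars.split₀] using hp)
  refine ⟨h.1, ?_⟩
  intro c hc hsp
  have h2 := h.2 c hc
  rw [hsp] at h2
  exact absurd h2 (by decide)

theorem pvIso_cc (a b : Char) (t : List Char) (h : pvIso (a :: b :: t) = true) :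
    (a ≠ ' ' ∨ b ≠ ' ') ∧ pvIso (b :: t) = true := by
  simp only [pvIso, Bool.and_eq_true, Bool.or_eq_true, Bool.not_eq_true', beq_eq_false_iff_ne] at h
  exact h

theorem pvIso_cons_nonspace (a : Char) (l : List Char) (ha : a ≠ ' ') (hl : pvIso l = true) :
    pvIso (a :: l) = true := by
  cases l with
  | nil => simp [pvIso, ha]
  | cons b t =>
    simp only [pvIso, Bool.and_eq_true, Bool.or_eq_true, Bool.not_eq_true', beq_eq_false_iff_ne]
    exact ⟨Or.inl ha, hl⟩

theorem pvIso_append_spaceless (p l : List Char) (hp : ∀ c ∈ p, c ≠ ' ') (hl : pvIso l = true) :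
    pvIso (p ++ l) = true := by
  induction p with
  | nil => simpa using hl
  | cons c q ih =>
    have h' := ih (fun x hx => hp x (by simp [hx]))
    simpa using pvIso_cons_nonspace c (q ++ l) (hp c (by simp)) h'

theorem pvIsoJoin :
    ∀ (Ps : List (List Char)), (∀ p ∈ Ps, p ≠ [] ∧ ∀ c ∈ p, c ≠ ' ') →
      pvIso (PySem.Chars.join [' '] Ps) = true ∧
      (Ps ≠ [] → ∃ a t, PySem.Chars.join [' '] Ps = a :: t ∧ a ≠ ' ') := by
  intro Ps
  induction Ps with
  | nil => simp [PySem.Chars.join_nil, pvIso]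
  | cons p ps ih =>
    intro h
    obtain ⟨hne, hsp⟩ := h p (by simp)
    cases ps with
    | nil =>
      rw [PySem.Chars.join_singleton]
      constructor
      · have := pvIso_append_spaceless p [] hsp (by simp [pvIso])
        simpa using this
      · intro _
        cases p with
        | nil => exact absurd rfl hne
        | cons a t => exact ⟨a, t, rfl, hsp a (by simp)⟩
    | cons q ps' =>
      have ih' := ih (fun r hr => h r (by simp [hr]))
      obtain ⟨a, t, he, ha⟩ := ih'.2 (by simp)
      have hj : pvIso (' ' :: PySem.Chars.join [' '] (q :: ps')) = true := by
        rw [he]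
        simp only [pvIso, Bool.and_eq_true, Bool.or_eq_true, Bool.not_eq_true', beq_eq_false_iff_ne]
        exact ⟨Or.inr ha, he ▸ ih'.1⟩
      rw [PySem.Chars.join_cons_cons, List.append_assoc, List.singleton_append]
      constructor
      · exact pvIso_append_spaceless p _ hsp hj
      · intro _
        cases p with
        | nil => exact absurd rfl hne
        | cons x w => exact ⟨x, w ++ ' ' :: PySem.Chars.join [' '] (q :: ps'), by simp, hsp x (by simp)⟩

theorem pvScrub_cons_nonspace (P : Char → Char → Bool) (a b : Char) (t : List Char) (hb : b ≠ ' ') :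
    pvScrub P (a :: b :: t) = a :: pvScrub P (b :: t) := by
  cases t with
  | nil => simp [pvScrub]
  | cons c u => simp [pvScrub, hb]

theorem pvScrub_drop (P : Char → Char → Bool) (a v : Char) (u : List Char) (hP : P a v = true) :
    pvScrub P (a :: ' ' :: v :: u) = a :: pvScrub P (v :: u) := by
  simp [pvScrub, hP]

theorem pvScrub_keep (P : Char → Char → Bool) (a v : Char) (u : List Char) (hP : P a v = false) :
    pvScrub P (a :: ' ' :: v :: u) = a :: ' ' :: pvScrub P (v :: u) := by
  simp [pvScrub, hP]

theorem pvScrub_false (l : List Char) : pvScrub (fun _ _ => false) l = l := by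
  match l with
  | [] => simp [pvScrub]
  | [a] => simp [pvScrub]
  | [a, b] => simp [pvScrub]
  | a :: b :: c :: t =>
    by_cases hb : b = ' '
    · have h := pvScrub_false (c :: t)
      simp [pvScrub, hb, h]
    · have h := pvScrub_false (b :: c :: t)
      rw [pvScrub_cons_nonspace _ a b (c :: t) hb, h]
  termination_by l.length
  decreasing_by all_goals (subst_vars; simp only [List.length_cons]; omega)

theorem pvScrub_congr (P Q : Char → Char → Bool) (h : ∀ a b, P a b = Q a b) (l : List Char) :
    pvScrub P l = pvScrub Q l := by
  have hPQ : P = Q := funext fun a => funext fun b => h a b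
  rw [hPQ]

theorem pvScrub_pres (P : Char → Char → Bool) (l : List Char)
    (h1 : pvIso l = true) (h2 : l.head? ≠ some ' ') :
    pvIso (pvScrub P l) = true ∧ (pvScrub P l).head? = l.head? := by
  match l with
  | [] => simp [pvScrub, pvIso]
  | [a] =>
    have ha : a ≠ ' ' := by simpa using h2
    simp [pvScrub, pvIso, ha]
  | [a, b] =>
    refine ⟨?_, ?_⟩
    · simpa [pvScrub] using h1
    · simp [pvScrub]
  | a :: b :: c :: t =>
    have ha : a ≠ ' ' := by simpa using h2
    by_cases hb : b = ' '
    · subst hb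
      have h1' := pvIso_cc a ' ' (c :: t) h1
      have h1'' := pvIso_cc ' ' c t h1'.2
      have hc : c ≠ ' ' := h1''.1.resolve_left (by simp)
      have ih := pvScrub_pres P (c :: t) h1''.2 (by simp [hc])
      rcases hS : pvScrub P (c :: t) with _ | ⟨x, w⟩
      · rw [hS] at ih; simp at ih
      · rw [hS] at ih
        have hx : x = c := by simpa using ih.2
        have hxs : x ≠ ' ' := hx ▸ hc
        by_cases hP : P a c = true
        · rw [pvScrub_drop P a c t hP, hS]
          exact ⟨pvIso_cons_nonspace a _ ha ih.1, by simp⟩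
        · rw [pvScrub_keep P a c t (by simpa using hP), hS]
          refine ⟨?_, by simp⟩
          refine pvIso_cons_nonspace a _ ha ?_
          simp only [pvIso, Bool.and_eq_true, Bool.or_eq_true, Bool.not_eq_true', beq_eq_false_iff_ne]
          exact ⟨Or.inr hxs, ih.1⟩
    · rw [pvScrub_cons_nonspace P a b (c :: t) hb]
      have h1' := pvIso_cc a b (c :: t) h1
      have ih := pvScrub_pres P (b :: c :: t) h1'.2 (by simp [hb])
      rcases hS : pvScrub P (b :: c :: t) with _ | ⟨x, w⟩
      · rw [hS] at ih; simp at ih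
      · rw [hS] at ih
        exact ⟨pvIso_cons_nonspace a _ ha ih.1, by simp⟩
  termination_by l.length
  decreasing_by all_goals (subst_vars; simp only [List.length_cons]; omega)

theorem pvScrub_comp (P Q : Char → Char → Bool) (l : List Char)
    (h1 : pvIso l = true) (h2 : l.head? ≠ some ' ') :
    pvScrub P (pvScrub Q l) = pvScrub (fun a b => Q a b || P a b) l := by
  match l with
  | [] => simp [pvScrub]
  | [a] => simp [pvScrub]
  | [a, b] => simp [pvScrub]
  | a :: b :: c :: t =>
    have ha : a ≠ ' ' := by simpa using h2
    by_cases hb : b = ' '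
    · subst hb
      have h1' := pvIso_cc a ' ' (c :: t) h1
      have h1'' := pvIso_cc ' ' c t h1'.2
      have hc : c ≠ ' ' := h1''.1.resolve_left (by simp)
      have hisoc : pvIso (c :: t) = true := h1''.2
      have hheadc : (c :: t).head? ≠ some ' ' := by simp [hc]
      have hpres := pvScrub_pres Q (c :: t) hisoc hheadc
      rcases hS : pvScrub Q (c :: t) with _ | ⟨x, w⟩
      · rw [hS] at hpres; simp at hpres
      · rw [hS] at hpres
        have hx : x = c := by simpa using hpres.2
        have hxs : x ≠ ' ' := hx ▸ hc
        have ihc := pvScrub_comp P Q (c :: t) hisoc hheadc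
        by_cases hQ : Q a c = true
        · rw [pvScrub_drop Q a c t hQ, hS, pvScrub_cons_nonspace P a x w hxs, ← hS, ihc,
            pvScrub_drop _ a c t (by simp [hQ])]
        · rw [pvScrub_keep Q a c t (by simpa using hQ), hS]
          by_cases hP : P a x = true
          · rw [pvScrub_drop P a x w hP, ← hS, ihc,
              pvScrub_drop _ a c t (by simp [hx ▸ hP])]
          · rw [pvScrub_keep P a x w (by simpa using hP), ← hS, ihc,
              pvScrub_keep _ a c t (by
                have hP' : P a c = false := by
                  rw [← hx]; simpa using hP
                simp [hQ, hP'])]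
    · have h1' := pvIso_cc a b (c :: t) h1
      have hiso' : pvIso (b :: c :: t) = true := h1'.2
      have hhead' : (b :: c :: t).head? ≠ some ' ' := by simp [hb]
      have hpres := pvScrub_pres Q (b :: c :: t) hiso' hhead'
      rcases hS : pvScrub Q (b :: c :: t) with _ | ⟨x, w⟩
      · rw [hS] at hpres; simp at hpres
      · rw [hS] at hpres
        have hx : x = b := by simpa using hpres.2
        have hxs : x ≠ ' ' := hx ▸ hb
        rw [pvScrub_cons_nonspace Q a b (c :: t) hb, hS, pvScrub_cons_nonspace P a x w hxs,
          ← hS, pvScrub_comp P Q (b :: c :: t) hiso' hhead',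
          pvScrub_cons_nonspace _ a b (c :: t) hb]
  termination_by l.length
  decreasing_by all_goals (subst_vars; simp only [List.length_cons]; omega)

theorem pvRepl_after (c : Char) (hc : c ≠ ' ') (l : List Char)
    (h1 : pvIso l = true) (h2 : l.head? ≠ some ' ') :
    pvRepl c [' '] [c] l = pvScrub (fun a _ => a == c) l := by
  match l with
  | [] => simp [pvRepl, pvScrub]
  | [a] =>
    rw [pvRepl_cons_neg c [' '] [c] a [] (pvPre2_nil c ' ' a)]
    simp [pvRepl, pvScrub]
  | a :: b :: t =>
    by_cases hb : b = ' '
    · subst hb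
      have ha : a ≠ ' ' := by simpa using h2
      have h1' := pvIso_cc a ' ' t h1
      cases t with
      | nil => simp [pvIso] at h1
      | cons v u =>
        have h1'' := pvIso_cc ' ' v u h1'.2
        have hv : v ≠ ' ' := h1''.1.resolve_left (by simp)
        have ih := pvRepl_after c hc (v :: u) h1''.2 (by simp [hv])
        by_cases hac : a = c
        · rw [pvRepl_cons_pos c [' '] [c] a (' ' :: v :: u)
            (pvPre2_pos c ' ' a ' ' (v :: u) hac.symm rfl)]
          rw [show (' ' :: v :: u).drop ([' '] : List Char).length = v :: u from rfl]
          rw [ih, pvScrub_drop _ a v u (by simp [hac])]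
          simp [hac]
        · rw [pvRepl_cons_neg c [' '] [c] a (' ' :: v :: u)
            (pvPre2_neg_head c ' ' a (' ' :: v :: u) (fun h => hac h.symm))]
          rw [pvRepl_cons_neg c [' '] [c] ' ' (v :: u)
            (pvPre2_neg_head c ' ' ' ' (v :: u) hc)]
          rw [ih, pvScrub_keep _ a v u (by simp [hac])]
    · have h1' := pvIso_cc a b t h1
      have ih := pvRepl_after c hc (b :: t) h1'.2 (by simp [hb])
      rw [pvRepl_cons_neg c [' '] [c] a (b :: t)
        (pvPre2_neg_snd c ' ' a b t (fun h => hb h.symm))]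
      rw [ih, pvScrub_cons_nonspace _ a b t hb]
  termination_by l.length
  decreasing_by all_goals (subst_vars; simp only [List.length_cons]; omega)

theorem pvRepl_before (c : Char) (hc : c ≠ ' ') (l : List Char)
    (h1 : pvIso l = true) (h2 : l.head? ≠ some ' ') :
    pvRepl ' ' [c] [c] l = pvScrub (fun _ b => b == c) l := by
  match l with
  | [] => simp [pvRepl, pvScrub]
  | [a] =>
    have ha : a ≠ ' ' := by simpa using h2
    rw [pvRepl_cons_neg ' ' [c] [c] a [] (pvPre2_neg_head ' ' c a [] (fun h => ha h.symm))]
    simp [pvRepl, pvScrub]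
  | a :: b :: t =>
    have ha : a ≠ ' ' := by simpa using h2
    by_cases hb : b = ' '
    · subst hb
      have h1' := pvIso_cc a ' ' t h1
      cases t with
      | nil => simp [pvIso] at h1
      | cons v u =>
        have h1'' := pvIso_cc ' ' v u h1'.2
        have hv : v ≠ ' ' := h1''.1.resolve_left (by simp)
        have ih := pvRepl_before c hc (v :: u) h1''.2 (by simp [hv])
        rw [pvRepl_cons_neg ' ' [c] [c] a (' ' :: v :: u)
          (pvPre2_neg_head ' ' c a (' ' :: v :: u) (fun h => ha h.symm))]
        by_cases hvc : v = c
        · rw [pvRepl_cons_pos ' ' [c] [c] ' ' (v :: u)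
            (pvPre2_pos ' ' c ' ' v u rfl hvc.symm)]
          rw [show (v :: u).drop ([c] : List Char).length = u from rfl]
          rw [pvRepl_cons_neg ' ' [c] [c] v u
            (pvPre2_neg_head ' ' c v u (fun h => hv h.symm))] at ih
          rw [pvScrub_drop _ a v u (by simp [hvc]), ← ih]
          simp [hvc]
        · rw [pvRepl_cons_neg ' ' [c] [c] ' ' (v :: u)
            (pvPre2_neg_snd ' ' c ' ' v u (fun h => hvc h.symm))]
          rw [ih, pvScrub_keep _ a v u (by simp [hvc])]
    · have h1' := pvIso_cc a b t h1
      have ih := pvRepl_before c hc (b :: t) h1'.2 (by simp [hb])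
      rw [pvRepl_cons_neg ' ' [c] [c] a (b :: t)
        (pvPre2_neg_head ' ' c a (b :: t) (fun h => ha h.symm))]
      rw [ih, pvScrub_cons_nonspace _ a b t hb]
  termination_by l.length
  decreasing_by all_goals (subst_vars; simp only [List.length_cons]; omega)

theorem pvStep_after (c : Char) (hc : c ≠ ' ') (Q : Char → Char → Bool) (l : List Char)
    (h1 : pvIso l = true) (h2 : l.head? ≠ some ' ') :
    pvRepl c [' '] [c] (pvScrub Q l) = pvScrub (fun a b => Q a b || (a == c)) l := by
  obtain ⟨hi, hh⟩ := pvScrub_pres Q l h1 h2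
  rw [pvRepl_after c hc _ hi (by rw [hh]; exact h2)]
  exact pvScrub_comp _ _ l h1 h2

theorem pvStep_before (c : Char) (hc : c ≠ ' ') (Q : Char → Char → Bool) (l : List Char)
    (h1 : pvIso l = true) (h2 : l.head? ≠ some ' ') :
    pvRepl ' ' [c] [c] (pvScrub Q l) = pvScrub (fun a b => Q a b || (b == c)) l := by
  obtain ⟨hi, hh⟩ := pvScrub_pres Q l h1 h2
  rw [pvRepl_before c hc _ hi (by rw [hh]; exact h2)]
  exact pvScrub_comp _ _ l h1 h2

theorem pvChain (ps : List (Char × Bool)) (hps : ∀ q ∈ ps, q.1 ≠ ' ')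
    (Q : Char → Char → Bool) (l : List Char)
    (h1 : pvIso l = true) (h2 : l.head? ≠ some ' ') :
    ps.foldl (fun acc q => cond q.2 (pvRepl q.1 [' '] [q.1] acc) (pvRepl ' ' [q.1] [q.1] acc))
        (pvScrub Q l)
    = pvScrub (fun a b => Q a b || ps.any (fun q => cond q.2 (a == q.1) (b == q.1))) l := by
  induction ps generalizing Q with
  | nil =>
    simp only [List.foldl_nil, List.any_nil, Bool.or_false]
  | cons q ps' ih =>
    obtain ⟨qc, qb⟩ := q
    have hqc : qc ≠ ' ' := hps (qc, qb) (by simp)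
    have hps' : ∀ r ∈ ps', r.1 ≠ ' ' := fun r hr => hps r (by simp [hr])
    cases qb
    · simp only [List.foldl_cons, cond_false]
      rw [pvStep_before qc hqc Q l h1 h2, ih hps' _]
      refine pvScrub_congr _ _ ?_ l
      intro a b
      simp [Bool.or_assoc]
    · simp only [List.foldl_cons, cond_true]
      rw [pvStep_after qc hqc Q l h1 h2, ih hps' _]
      refine pvScrub_congr _ _ ?_ l
      intro a b
      simp [Bool.or_assoc]

theorem pvZip3_cons {α β γ : Type} (a : α) (b : β) (c : γ) (as : List α) (bs : List β) (cs : List γ) :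
    pvZip3 (a :: as) (b :: bs) (c :: cs) = (a, b, c) :: pvZip3 as bs cs := rfl

theorem pvBGen (l : List Char) (p : Char) (acc : List Char)
    (h1 : pvIso l = true) (h2 : l.head? ≠ some ' ') :
    (pvZip3 (p :: l) l (l.drop 1 ++ [' '])).foldl
      (fun acc t => if t.2.1 = ' ' ∧ (t.1 ∈ PySem.Set.ofList "MLHVZmlhvz".toList ∨
          t.2.2 ∈ PySem.Set.ofList "MLHVZmlhvz".toList) then acc else acc ++ [t.2.1]) acc
    = acc ++ pvScrub pvPt l := by
  match l with
  | [] =>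
    rw [show pvZip3 [p] ([] : List Char) (([] : List Char).drop 1 ++ [' ']) = [] from rfl]
    simp [pvScrub]
  | [a] =>
    have ha : a ≠ ' ' := by simpa using h2
    rw [show ([a] : List Char).drop 1 ++ [' '] = [' '] from rfl, pvZip3_cons,
      show pvZip3 [a] ([] : List Char) ([] : List Char) = [] from rfl,
      List.foldl_cons, List.foldl_nil]
    simp [pvScrub, ha]
  | a :: b :: t =>
    have ha : a ≠ ' ' := by simpa using h2
    by_cases hb : b = ' '
    · subst hb
      have h1' := pvIso_cc a ' ' t h1
      cases t with
      | nil => simp [pvIso] at h1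
      | cons v u =>
        have h1'' := pvIso_cc ' ' v u h1'.2
        have hv : v ≠ ' ' := h1''.1.resolve_left (by simp)
        rw [show (a :: ' ' :: v :: u).drop 1 ++ [' '] = ' ' :: v :: (u ++ [' ']) from by simp]
        rw [pvZip3_cons, pvZip3_cons, List.foldl_cons, List.foldl_cons]
        dsimp only
        by_cases hor : a ∈ PySem.Set.ofList "MLHVZmlhvz".toList ∨
            v ∈ PySem.Set.ofList "MLHVZmlhvz".toList
        · rw [if_pos (⟨rfl, hor⟩ : (' ' : Char) = ' ' ∧
              (a ∈ PySem.Set.ofList "MLHVZmlhvz".toList ∨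
               v ∈ PySem.Set.ofList "MLHVZmlhvz".toList))]
          rw [if_neg (fun h => ha h.1)]
          have ih := pvBGen (v :: u) ' ' (acc ++ [a]) h1''.2 (by simp [hv])
          rw [show (v :: u).drop 1 ++ [' '] = u ++ [' '] from by simp] at ih
          rw [ih, pvScrub_drop pvPt a v u (by simpa [pvPt] using hor)]
          simp
        · rw [if_neg (fun h => hor h.2)]
          rw [if_neg (fun h => ha h.1)]
          have ih := pvBGen (v :: u) ' ' (acc ++ [a] ++ [' ']) h1''.2 (by simp [hv])
          rw [show (v :: u).drop 1 ++ [' '] = u ++ [' '] from by simp] at ih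
          rw [ih, pvScrub_keep pvPt a v u (by simpa [pvPt] using hor)]
          simp
    · rw [show (a :: b :: t).drop 1 ++ [' '] = b :: (t ++ [' ']) from by simp]
      rw [pvZip3_cons, List.foldl_cons]
      dsimp only
      rw [if_neg (fun h => ha h.1)]
      have h1' := pvIso_cc a b t h1
      have ih := pvBGen (b :: t) a (acc ++ [a]) h1'.2 (by simp [hb])
      rw [show (b :: t).drop 1 ++ [' '] = t ++ [' '] from by simp] at ih
      rw [ih, pvScrub_cons_nonspace _ a b t hb]
      simp
  termination_by l.length
  decreasing_by all_goals (subst_vars; simp only [List.length_cons]; omega)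

-- string-literal toList facts used to evaluate A's needles and B's sentinels
theorem pvTL_sp : (" " : String).toList = [' '] := by decide
theorem pvTL_H : ("H" : String).toList = ['H'] := by decide
theorem pvTL_V : ("V" : String).toList = ['V'] := by decide
theorem pvTL_M : ("M" : String).toList = ['M'] := by decide
theorem pvTL_L : ("L" : String).toList = ['L'] := by decide
theorem pvTL_h : ("h" : String).toList = ['h'] := by decide
theorem pvTL_v : ("v" : String).toList = ['v'] := by decide
theorem pvTL_m : ("m" : String).toList = ['m'] := by decide
theorem pvTL_l : ("l" : String).toList = ['l'] := by decide
theorem pvTL_Z : ("Z" : String).toList = ['Z'] := by decide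
theorem pvTL_z : ("z" : String).toList = ['z'] := by decide
theorem pvTL_sZ : (" Z" : String).toList = [' ', 'Z'] := by decide
theorem pvTL_Zs : ("Z " : String).toList = ['Z', ' '] := by decide
theorem pvTL_sz : (" z" : String).toList = [' ', 'z'] := by decide
theorem pvTL_zs : ("z " : String).toList = ['z', ' '] := by decide

theorem pvPred_eq (a b : Char) :
    (false || pvPasses.any (fun q => cond q.2 (a == q.1) (b == q.1))) = pvPt a b := by
  have hS : ("MLHVZmlhvz" : String).toList = ['M', 'L', 'H', 'V', 'Z', 'm', 'l', 'h', 'v', 'z'] := by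
    decide
  rw [Bool.eq_iff_iff]
  simp only [pvPasses, pvPt, hS, List.any_cons, List.any_nil, cond_true, cond_false,
    Bool.or_eq_true, Bool.false_or, Bool.or_false, beq_iff_eq, decide_eq_true_eq,
    PySem.Set.mem_ofList, List.mem_cons, List.not_mem_nil, or_false]
  tauto

-- ===== VERDICT (by name: the statement is the Claim_ definition above) =====
set_option maxHeartbeats 1000000 in
theorem minify_path_d_py_spec : Claim_equal_minify_path_d_py := by
  unfold Claim_equal_minify_path_d_py
  intro d _
  unfold Spec_minify_path_d_py
  by_cases hd : d = ""
  · unfold minify_path_d_py minify_path_d_py_alt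
    rw [if_pos hd, if_pos hd]
  · have key : (minify_path_d_py d).toList = (minify_path_d_py_alt d).toList := by
      unfold minify_path_d_py minify_path_d_py_alt
      rw [if_neg hd, if_neg hd]
      set s := PySem.Str.join " " (PySem.Str.split₀ d) with hs
      have hn : s.toList = PySem.Chars.join [' '] (PySem.Chars.split₀ d.toList) := by
        rw [hs, PySem.Str.toList_join, PySem.Str.split₀_map_toList, pvTL_sp]
      have hj := pvIsoJoin (PySem.Chars.split₀ d.toList) (pvSplitGood d.toList)
      have hiso : pvIso s.toList = true := by rw [hn]; exact hj.1
      have hhead : s.toList.head? ≠ some ' ' := by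
        rw [hn]
        by_cases hPs : PySem.Chars.split₀ d.toList = []
        · simp [hPs, PySem.Chars.join_nil]
        · obtain ⟨a, t, he, hane⟩ := hj.2 hPs
          rw [he]
          simp [hane]
      have hslice : (PySem.Str.slice s (some 1) none).toList = s.toList.drop 1 := by
        simp [pysem]
      have hchain := pvChain pvPasses (by decide) (fun _ _ => false) s.toList hiso hhead
      rw [pvScrub_false] at hchain
      simp only [pvPasses, List.foldl_cons, List.foldl_nil, cond_true, cond_false] at hchain
      have hbgen := pvBGen s.toList ' ' [] hiso hhead
      simp only [List.foldl_cons, List.foldl_nil, PySem.Str.toList_replace, String.toList_append,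
        pvTL_sp, pvTL_H, pvTL_V, pvTL_M, pvTL_L, pvTL_h, pvTL_v, pvTL_m, pvTL_l, pvTL_Z, pvTL_z,
        pvTL_sZ, pvTL_Zs, pvTL_sz, pvTL_zs, List.cons_append, List.nil_append,
        pvReplace_eq, String.toList_ofList, hslice]
      rw [hchain, hbgen]
      simp only [List.nil_append]
      exact pvScrub_congr _ pvPt pvPred_eq s.toList
    have h1 : String.ofList (minify_path_d_py d).toList = minify_path_d_py d :=
      String.ofList_toList
    have h2 : String.ofList (minify_path_d_py_alt d).toList = minify_path_d_py_alt d :=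
      String.ofList_toList
    rw [← h1, ← h2, key]
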